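-- pv_equiv track=rewrite | github.com/PdxCodeGuild/class_pangolin | code/wiley/lab22/ari_v1.py | sentence_counting
-- ===== SOURCE A (Python) =====
-- def sentence_counting(contents):
--     '''This function returns the number of sentences in a given string.'''
--     sentence_count = 0
--     wait = 4
--     for i in range(len(contents)):
--         wait -=1
--         if contents[i] in ('.','!','?','...','\n','\t') and wait < 0:
--             sentence_count +=1
--             wait = 4
--
--
--
--
--     return sentence_count
-- ===== SOURCE B (Python) =====
-- def sentence_counting(contents):
--     '''This function returns the number of sentences in a given string.'''
--     ends = {'.', '!', '?', '\n', '\t'}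
--     candidates = [i for i, c in enumerate(contents) if c in ends]
--     count = 0
--     last = -1
--     for p in candidates:
--         if p - last >= 5:
--             count += 1
--             last = p
--     return count
-- ===== Notes on version B (the rewrite author's own statement) =====
-- stated objective: alternative
-- what changed: Replaces the mutable cooldown countdown over every character with a two-phase decomposition: first collect the indices of sentence-ending characters, then a greedy gap-based pass (count an index iff it is at least 5 past the last counted one, starting from last=-1).
import Mathlib
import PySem

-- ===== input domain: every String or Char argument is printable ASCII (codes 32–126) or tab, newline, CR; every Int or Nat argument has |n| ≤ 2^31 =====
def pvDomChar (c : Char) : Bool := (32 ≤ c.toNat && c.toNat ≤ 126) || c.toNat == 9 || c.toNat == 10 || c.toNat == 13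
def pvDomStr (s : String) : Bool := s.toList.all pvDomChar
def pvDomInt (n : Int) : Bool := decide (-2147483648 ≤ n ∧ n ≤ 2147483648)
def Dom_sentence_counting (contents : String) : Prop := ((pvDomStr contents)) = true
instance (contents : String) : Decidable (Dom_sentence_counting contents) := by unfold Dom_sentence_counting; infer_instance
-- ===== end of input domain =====

-- B replaces A's per-character cooldown countdown with a candidate-index collection
-- plus a greedy gap-≥5 selection pass (objective: alternative decomposition, same cost).

-- membership test `contents[i] in ('.','!','?','...','\n','\t')` — the 3-char '...'
-- can never equal a single character, so only the five single chars can match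
def pvIsEnd (c : Char) : Bool := c == '.' || c == '!' || c == '?' || c == '\n' || c == '\t'

-- ===== PORT A =====
-- A's loop over i in range(len(contents)), state (sentence_count, wait)
def pvALoop : List Char → Int → Int → Int
  | [], count, _ => count
  | c :: rest, count, wait =>
    let wait' := wait - 1
    if pvIsEnd c ∧ wait' < 0 then pvALoop rest (count + 1) 4
    else pvALoop rest count wait'

def sentence_counting (contents : String) : Int := pvALoop contents.toList 0 4

-- ===== PORT B =====
-- greedy pass: count a candidate index p iff p - last ≥ 5
def pvBGreedy : List Int → Int → Int → Int
  | [], count, _ => count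
  | p :: rest, count, last =>
    if p - last ≥ 5 then pvBGreedy rest (count + 1) p
    else pvBGreedy rest count last

def sentence_counting_alt (contents : String) : Int :=
  let candidates :=
    ((contents.toList.zipIdx.filter (fun ci => pvIsEnd ci.1)).map (fun ci => (ci.2 : Int)))
  pvBGreedy candidates 0 (-1)

-- ===== PRECONDITION & SPEC =====
def Spec_sentence_counting (contents : String) (out : Int) : Prop := out = sentence_counting_alt contents
instance (contents : String) (out : Int) : Decidable (Spec_sentence_counting contents out) := by unfold Spec_sentence_counting; infer_instance

-- ===== CLAIM (what is proved, stated in full; the proofs are below) =====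
def Claim_equal_sentence_counting : Prop := ∀ (contents : String), Dom_sentence_counting contents → Spec_sentence_counting contents (sentence_counting contents)

-- ===== LEMMAS AND PROOFS =====

-- loop invariant: at index i with last counted index `last`, A's wait equals 5 + last - i
theorem pvLoop_eq (cs : List Char) : ∀ (i : Nat) (count last : Int),
    pvALoop cs count (5 + last - (i : Int)) =
      pvBGreedy (((cs.zipIdx i).filter (fun ci => pvIsEnd ci.1)).map (fun ci => (ci.2 : Int)))
        count last := by
  induction cs with
  | nil => intro i count last; simp [pvALoop, pvBGreedy]
  | cons c rest ih =>
    intro i count last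
    by_cases hc : pvIsEnd c = true
    · by_cases hw : (i : Int) - last ≥ 5
      · have : pvALoop (c :: rest) count (5 + last - (i : Int))
            = pvALoop rest (count + 1) 4 := by
          simp only [pvALoop]
          rw [if_pos ⟨hc, by omega⟩]
        rw [this]
        have h4 : (4 : Int) = 5 + (i : Int) - ((i : Nat) + 1 : Nat) := by push_cast; ring
        rw [h4, ih]
        simp [List.zipIdx_cons, hc, pvBGreedy, hw]
      · have : pvALoop (c :: rest) count (5 + last - (i : Int))
            = pvALoop rest count (5 + last - (i : Int) - 1) := by
          simp only [pvALoop]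
          rw [if_neg]; intro h; omega
        rw [this]
        have h4 : 5 + last - (i : Int) - 1 = 5 + last - ((i : Nat) + 1 : Nat) := by
          push_cast; ring
        rw [h4, ih]
        simp [List.zipIdx_cons, hc, pvBGreedy, hw]
    · have : pvALoop (c :: rest) count (5 + last - (i : Int))
          = pvALoop rest count (5 + last - (i : Int) - 1) := by
        simp only [pvALoop]
        rw [if_neg]; intro h; exact hc h.1
      rw [this]
      have h4 : 5 + last - (i : Int) - 1 = 5 + last - ((i : Nat) + 1 : Nat) := by
        push_cast; ring
      rw [h4, ih]
      simp [List.zipIdx_cons, hc]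

-- ===== VERDICT (by name: the statement is the Claim_ definition above) =====
theorem sentence_counting_spec : Claim_equal_sentence_counting := by
  intro contents _
  unfold Spec_sentence_counting sentence_counting sentence_counting_alt
  have := pvLoop_eq contents.toList 0 0 (-1)
  simpa using this
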